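-- pv_equiv track=rewrite | github.com/fly8764/LeetCode | exam/mi_02.py | find2
-- ===== SOURCE A (Python) =====
-- def find2(nums):
--     size = len(nums)
--     if size %2 == 0 or size == 1:
--         return True
--     dp = [0] *size
--     for i in reversed(range(size)):
--         dp[i] = nums[i]
--         for j in range(i+1,size):
--             dp[j] = max(nums[i] -dp[j],nums[j]-dp[j-1])
--     return dp[-1] > 0
-- ===== SOURCE B (Python) =====
-- def find2(nums):
--     n = len(nums)
--     if n % 2 == 0 or n == 1:
--         return True
--     # diagonal DP by interval length: cur[i] = best score difference on nums[i:i+L+1]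
--     cur = list(nums)                      # intervals of length 1
--     for L in range(1, n):
--         prev = cur
--         cur = [max(nums[i] - prev[i + 1], nums[i + L] - prev[i])
--                for i in range(n - L)]
--     return cur[0] > 0
-- ===== Notes on version B (the rewrite author's own statement) =====
-- stated objective: alternative
-- what changed: Replaces A's in-place rolling 1D array (outer loop descending over the left endpoint, inner loop overwriting dp in place with aliased reads) by a diagonal DP over interval lengths that builds a fresh row per length from the previous row; same O(n^2) recurrence, different traversal order and no in-place aliasing.
import Mathlib
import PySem

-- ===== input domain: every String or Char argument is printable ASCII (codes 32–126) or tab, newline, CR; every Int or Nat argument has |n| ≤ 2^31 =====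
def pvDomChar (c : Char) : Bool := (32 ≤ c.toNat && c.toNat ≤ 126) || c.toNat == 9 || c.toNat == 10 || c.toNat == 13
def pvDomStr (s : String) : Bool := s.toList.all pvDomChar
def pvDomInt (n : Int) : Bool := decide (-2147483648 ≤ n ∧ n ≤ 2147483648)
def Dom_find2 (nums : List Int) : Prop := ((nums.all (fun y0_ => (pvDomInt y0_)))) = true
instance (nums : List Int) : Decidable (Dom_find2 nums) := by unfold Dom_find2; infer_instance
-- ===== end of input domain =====

-- B replaces A's in-place rolling 1D array (outer loop on the left endpoint, descending)
-- by a diagonal DP over interval lengths with two fresh rows (objective: alternative decomposition, same O(n^2) cost).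

-- ===== PORT A =====
def find2 (nums : List Int) : Bool :=
  let size : Int := nums.length
  if PySem.Int.mod size 2 == 0 || size == 1 then true
  else
    let dp0 : List Int := List.replicate nums.length 0
    let dp := ((PySem.List.pyRange 0 size 1).reverse).foldl (fun dp i =>
        (PySem.List.pyRange (i + 1) size 1).foldl (fun dp j =>
            PySem.List.pySetD dp j
              (max (PySem.List.pyGetD nums i 0 - PySem.List.pyGetD dp j 0)
                   (PySem.List.pyGetD nums j 0 - PySem.List.pyGetD dp (j - 1) 0)))
          (PySem.List.pySetD dp i (PySem.List.pyGetD nums i 0))) dp0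
    decide (PySem.List.pyGetD dp (-1) 0 > 0)

-- ===== PORT B =====
def find2_alt (nums : List Int) : Bool :=
  let n : Int := nums.length
  if PySem.Int.mod n 2 == 0 || n == 1 then true
  else
    let cur := (PySem.List.pyRange 1 n 1).foldl (fun cur L =>
        (PySem.List.pyRange 0 (n - L) 1).map (fun i =>
          max (PySem.List.pyGetD nums i 0 - PySem.List.pyGetD cur (i + 1) 0)
              (PySem.List.pyGetD nums (i + L) 0 - PySem.List.pyGetD cur i 0))) nums
    decide (PySem.List.pyGetD cur 0 0 > 0)

-- ===== PRECONDITION & SPEC =====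
def Spec_find2 (nums : List Int) (out : Bool) : Prop := out = find2_alt nums
instance (nums : List Int) (out : Bool) : Decidable (Spec_find2 nums out) := by unfold Spec_find2; infer_instance

-- ===== CLAIM (what is proved, stated in full; the proofs are below) =====
def Claim_equal_find2 : Prop := ∀ (nums : List Int), Dom_find2 nums → Spec_find2 nums (find2 nums)

-- ===== LEMMAS AND PROOFS =====

-- game value of the subarray nums[i..j]: best score difference for the player to move
def gval (nums : List Int) (i j : Nat) : Int :=
  if j ≤ i then nums.getD i 0
  else max (nums.getD i 0 - gval nums (i + 1) j) (nums.getD j 0 - gval nums i (j - 1))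
termination_by j - i
decreasing_by all_goals omega

theorem getD_mr (F : Nat → Int) (m t : Nat) (h : t < m) :
    ((List.range m).map F).getD t 0 = F t := by
  simp [List.getD, h]

theorem set_mr (F : Nat → Int) (m t : Nat) (v : Int) (_h : t < m) :
    ((List.range m).map F).set t v = (List.range m).map (fun k => if k = t then v else F k) := by
  apply List.ext_getElem (by simp)
  intro k h1 h2
  simp only [List.getElem_set, List.getElem_map, List.getElem_range]
  simp at h1
  by_cases hk : t = k <;> simp [hk, eq_comm]

theorem congr_mr {F G : Nat → Int} (m : Nat) (h : ∀ k, k < m → F k = G k) :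
    (List.range m).map F = (List.range m).map G :=
  List.map_congr_left (fun k hk => h k (List.mem_range.mp hk))

theorem self_mr (nums : List Int) :
    (List.range nums.length).map (fun i => nums.getD i 0) = nums := by
  apply List.ext_getElem (by simp)
  intro k h1 h2
  simp [List.getD, List.getElem?_eq_getElem h2]


theorem alt_step (nums : List Int) (L : Nat) (h1 : 1 ≤ L) (h2 : L < nums.length) :
    (PySem.List.pyRange 0 ((nums.length : Int) - (L : Int)) 1).map (fun i =>
      max (PySem.List.pyGetD nums i 0 -
             PySem.List.pyGetD ((List.range (nums.length - L + 1)).map (fun t => gval nums t (t + L - 1))) (i + 1) 0)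
          (PySem.List.pyGetD nums (i + (L : Int)) 0 -
             PySem.List.pyGetD ((List.range (nums.length - L + 1)).map (fun t => gval nums t (t + L - 1))) i 0))
    = (List.range (nums.length - L)).map (fun i => gval nums i (i + L)) := by
  have hc : ((nums.length : Int) - (L : Int)) = ((nums.length - L : Nat) : Int) := by omega
  rw [hc, PySem.List.pyRange_zero, List.map_map]
  simp only [Int.toNat_natCast]
  apply List.map_congr_left
  intro k hk
  simp only [List.mem_range] at hk
  simp only [Function.comp]
  rw [show ((k : Int) + 1) = ((k + 1 : Nat) : Int) by omega,
      show ((k : Int) + (L : Int)) = ((k + L : Nat) : Int) by omega,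
      PySem.List.pyGetD_natCast]
  simp only [PySem.List.pyGetD_natCast]
  rw [getD_mr _ _ _ (by omega), getD_mr _ _ _ (by omega)]
  rw [show k + 1 + L - 1 = k + L from by omega]
  conv_rhs => rw [gval]
  rw [if_neg (by omega)]

-- B-side loop invariant: after processing lengths 1..L-1, cur lists gval i (i+L-1)
theorem alt_loop (nums : List Int) (d : Nat) : ∀ L : Nat, 1 ≤ L → L + d = nums.length →
    (PySem.List.pyRange (L : Int) (nums.length : Int) 1).foldl (fun cur M =>
        (PySem.List.pyRange 0 ((nums.length : Int) - M) 1).map (fun i =>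
          max (PySem.List.pyGetD nums i 0 - PySem.List.pyGetD cur (i + 1) 0)
              (PySem.List.pyGetD nums (i + M) 0 - PySem.List.pyGetD cur i 0)))
      ((List.range (nums.length - L + 1)).map (fun i => gval nums i (i + L - 1)))
    = [gval nums 0 (nums.length - 1)] := by
  induction d with
  | zero =>
    intro L h1 h2
    rw [PySem.List.pyRange_one_eq_nil (by omega)]
    simp only [List.foldl_nil]
    rw [show nums.length - L + 1 = 1 from by omega, List.range_one, List.map_singleton]
    rw [show 0 + L - 1 = nums.length - 1 from by omega]
  | succ e ih =>
    intro L h1 h2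
    rw [PySem.List.pyRange_one_cons (by exact_mod_cast Nat.lt_of_lt_of_le (Nat.lt_succ_of_le le_rfl) (by omega) : (L : Int) < (nums.length : Int)), List.foldl_cons]
    rw [alt_step nums L h1 (by omega)]
    rw [show ((L : Int) + 1) = ((L + 1 : Nat) : Int) from by omega]
    have hr : (List.range (nums.length - L)).map (fun i => gval nums i (i + L))
        = (List.range (nums.length - (L + 1) + 1)).map (fun i => gval nums i (i + (L + 1) - 1)) := by
      rw [show nums.length - (L + 1) + 1 = nums.length - L from by omega]
      exact congr_mr _ (fun k hk => by rw [show k + (L + 1) - 1 = k + L from by omega])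
    rw [hr]
    exact ih (L + 1) (by omega) (by omega)

-- A-side states, pointwise over range
def Dst (nums : List Int) (i : Nat) : List Int :=
  (List.range nums.length).map (fun k => if k < i then 0 else gval nums i k)

def Est (nums : List Int) (i j : Nat) : List Int :=
  (List.range nums.length).map
    (fun k => if k < i then 0 else if k < j then gval nums i k else gval nums (i + 1) k)

theorem a_inner (nums : List Int) (i : Nat) (_hi : i < nums.length) (e : Nat) :
    ∀ j : Nat, i + 1 ≤ j → j + e = nums.length →
    (PySem.List.pyRange (j : Int) (nums.length : Int) 1).foldl (fun dp jj =>
        PySem.List.pySetD dp jj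
          (max (PySem.List.pyGetD nums (i : Int) 0 - PySem.List.pyGetD dp jj 0)
               (PySem.List.pyGetD nums jj 0 - PySem.List.pyGetD dp (jj - 1) 0)))
      (Est nums i j)
    = Est nums i nums.length := by
  induction e with
  | zero =>
    intro j hj1 hj2
    rw [PySem.List.pyRange_one_eq_nil (by omega)]
    rw [List.foldl_nil, show j = nums.length from by omega]
  | succ e ih =>
    intro j hj1 hj2
    rw [PySem.List.pyRange_one_cons (show (j : Int) < (nums.length : Int) from by
          exact_mod_cast (by omega : j < nums.length)), List.foldl_cons]
    have hstep : PySem.List.pySetD (Est nums i j) ((j : Int))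
        (max (PySem.List.pyGetD nums (i : Int) 0 - PySem.List.pyGetD (Est nums i j) ((j : Int)) 0)
             (PySem.List.pyGetD nums ((j : Int)) 0 - PySem.List.pyGetD (Est nums i j) ((j : Int) - 1) 0))
        = Est nums i (j + 1) := by
      rw [show ((j : Int) - 1) = ((j - 1 : Nat) : Int) from by omega]
      simp only [Est, PySem.List.pyGetD_natCast, PySem.List.pySetD_natCast]
      rw [getD_mr _ _ _ (by omega), getD_mr _ _ _ (by omega), set_mr _ _ _ _ (by omega),
          if_neg (show ¬ j < i from by omega), if_neg (show ¬ j < j from by omega),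
          if_neg (show ¬ j - 1 < i from by omega), if_pos (show j - 1 < j from by omega)]
      apply congr_mr
      intro k hk
      by_cases hkj : k = j
      · subst hkj
        rw [if_pos rfl, if_neg (show ¬ k < i from by omega), if_pos (show k < k + 1 from by omega)]
        conv_rhs => rw [gval]
        rw [if_neg (by omega)]
      · rw [if_neg hkj]
        split_ifs <;> first | rfl | omega
    rw [hstep, show ((j : Int) + 1) = ((j + 1 : Nat) : Int) from by omega]
    exact ih (j + 1) (by omega) (by omega)

theorem a_outer (nums : List Int) : ∀ i : Nat, i ≤ nums.length →
    ((PySem.List.pyRange 0 (i : Int) 1).reverse).foldl (fun dp ii =>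
        (PySem.List.pyRange (ii + 1) (nums.length : Int) 1).foldl (fun dp j =>
            PySem.List.pySetD dp j
              (max (PySem.List.pyGetD nums ii 0 - PySem.List.pyGetD dp j 0)
                   (PySem.List.pyGetD nums j 0 - PySem.List.pyGetD dp (j - 1) 0)))
          (PySem.List.pySetD dp ii (PySem.List.pyGetD nums ii 0)))
      (Dst nums i)
    = Dst nums 0 := by
  intro i
  induction i with
  | zero =>
    intro _
    rw [show ((0 : Nat) : Int) = 0 from rfl, PySem.List.pyRange_one_eq_nil le_rfl]
    rfl
  | succ i ih =>
    intro hin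
    rw [show (((i + 1 : Nat)) : Int) = (i : Int) + 1 from by push_cast; ring,
        PySem.List.pyRange_one_succ_right (by positivity), List.reverse_append,
        List.reverse_singleton, List.singleton_append, List.foldl_cons]
    have hset : PySem.List.pySetD (Dst nums (i + 1)) ((i : Int)) (PySem.List.pyGetD nums ((i : Int)) 0)
        = Est nums i (i + 1) := by
      simp only [Dst, Est, PySem.List.pyGetD_natCast, PySem.List.pySetD_natCast]
      rw [set_mr _ _ _ _ (by omega)]
      apply congr_mr
      intro k hk
      by_cases hki : k = i
      · subst hki
        rw [if_pos rfl, if_neg (show ¬ k < k from by omega), if_pos (show k < k + 1 from by omega)]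
        rw [gval, if_pos le_rfl]
      · rw [if_neg hki]
        split_ifs <;> first | rfl | omega
    rw [hset, show ((i : Int) + 1) = ((i + 1 : Nat) : Int) from by omega,
        a_inner nums i (by omega) (nums.length - (i + 1)) (i + 1) le_rfl (by omega)]
    have hEq : Est nums i nums.length = Dst nums i := by
      apply congr_mr
      intro k hk
      split_ifs <;> rfl
    rw [hEq]
    exact ih (by omega)

-- ===== VERDICT (by name: the statement is the Claim_ definition above) =====
theorem Dst_full (nums : List Int) : List.replicate nums.length (0 : Int) = Dst nums nums.length := by
  apply List.ext_getElem (by simp [Dst])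
  intro k h1 h2
  simp only [List.getElem_replicate, Dst, List.getElem_map, List.getElem_range]
  rw [if_pos (by simpa using h1)]

theorem cur_init (nums : List Int) (h : 1 ≤ nums.length) :
    nums = (List.range (nums.length - 1 + 1)).map (fun i => gval nums i (i + 1 - 1)) := by
  rw [show nums.length - 1 + 1 = nums.length from by omega]
  conv_lhs => rw [← self_mr nums]
  apply congr_mr
  intro k hk
  rw [show k + 1 - 1 = k from by omega, gval, if_pos le_rfl]

theorem find2_spec : Claim_equal_find2 := by
  intro nums _
  unfold Spec_find2 find2 find2_alt
  by_cases hg : (PySem.Int.mod (nums.length : Int) 2 == 0 || ((nums.length : Int) == 1)) = true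
  · simp only [hg, if_pos]
  · simp only [hg, Bool.false_eq_true, if_neg not_false]
    have h3 : 3 ≤ nums.length := by
      simp only [Bool.or_eq_true, beq_iff_eq, not_or] at hg
      obtain ⟨h1, h2⟩ := hg
      rcases Nat.lt_or_ge nums.length 3 with h | h
      · interval_cases hn : nums.length <;> simp_all
      · exact h
    rw [Dst_full nums, a_outer nums nums.length le_rfl]
    rw [PySem.List.pyGetD_neg_one _ _ (by
      simp only [Dst, ne_eq, List.map_eq_nil_iff, List.range_eq_nil]
      omega)]
    have hB := alt_loop nums (nums.length - 1) 1 le_rfl (by omega)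
    rw [← cur_init nums (by omega)] at hB
    simp only [Nat.cast_one] at hB
    rw [hB, PySem.List.pyGetD_zero_cons]
    congr 1
    rw [List.getLast_eq_getElem]
    simp only [Dst, List.getElem_map, List.getElem_range, List.length_map, List.length_range]
    rw [if_neg (by omega)]
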